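-- pv_equiv track=rewrite | github.com/seona-moon/Algorithm | 프로그래머스/unrated/120871. 저주의 숫자 3/저주의 숫자 3.py | solution
-- ===== SOURCE A (Python) =====
-- def solution(n):
--     cnt = 0
--     answer = 0
--     while(cnt!=n):
--         answer += 1
--         if answer%3==0 or str(answer).count("3"):
--             continue
--         cnt += 1
--     return answer
-- ===== SOURCE B (Python) =====
-- def solution(n):
--     # Enumerate only numbers with no digit '3' by mapping k's base-9 digits
--     # through 0,1,2,4,5,6,7,8,9 (skipping every number that contains a 3),
--     # then count those not divisible by 3.
--     cnt = 0
--     k = 0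
--     ans = 0
--     while cnt != n:
--         k += 1
--         x = 0
--         p = 1
--         t = k
--         while t:
--             d = t % 9
--             x += (d + 1 if d >= 3 else d) * p
--             p *= 10
--             t //= 9
--         if x % 3:
--             cnt += 1
--             ans = x
--     return ans
-- ===== Notes on version B (the rewrite author's own statement) =====
-- stated objective: alternative
-- what changed: Instead of scanning every integer and testing str(x) for a '3', B enumerates exactly the numbers without digit 3 in increasing order via a base-9 digit mapping (digits 0,1,2,4,...,9) and only filters by divisibility by 3; the string conversion and the scan over 3-containing numbers disappear.
import Mathlib
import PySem

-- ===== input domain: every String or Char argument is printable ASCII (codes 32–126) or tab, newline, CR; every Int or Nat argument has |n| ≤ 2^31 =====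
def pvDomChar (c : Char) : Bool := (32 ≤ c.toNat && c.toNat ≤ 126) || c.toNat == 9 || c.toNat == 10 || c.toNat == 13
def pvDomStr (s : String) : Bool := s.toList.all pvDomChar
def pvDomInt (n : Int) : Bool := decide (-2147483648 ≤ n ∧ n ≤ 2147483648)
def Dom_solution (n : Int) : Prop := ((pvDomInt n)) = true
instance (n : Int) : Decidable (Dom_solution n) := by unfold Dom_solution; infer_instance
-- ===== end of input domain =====

-- B enumerates only the digit-3-free numbers in increasing order via a base-9 digit mapping
-- (digits 0,1,2,4,…,9) and filters by divisibility by 3, instead of A's scan over every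
-- integer with a string test; return values agree for every n ≥ 0 (for n < 0 A loops forever).

-- ===== PORT A =====
-- A's while loop; the fuel only makes the recursion total (10^n + 1 iterations always
-- suffice for n ≥ 0, proved below): each iteration is exactly one pass of A's loop body.
def solutionLoopA (n : Int) (fuel : Nat) (cnt answer : Int) : Int :=
  match fuel with
  | 0 => answer
  | Nat.succ fuel =>
    if cnt ≠ n then
      let answer' := answer + 1
      if PySem.Int.mod answer' 3 = 0 ∨ PySem.Str.count (PySem.Int.toStr answer') "3" ≠ 0 then
        solutionLoopA n fuel cnt answer'
      else
        solutionLoopA n fuel (cnt + 1) answer'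
    else answer

def solution (n : Int) : Int := solutionLoopA n (10 ^ n.toNat + 1) 0 0

-- ===== PORT B =====
-- B's inner while: read t's base-9 digits, write them as decimal digits 0,1,2,4,…,9.
-- The fuel only makes the recursion total (t //= 9 reaches 0 within t+1 steps for t ≥ 0).
def convLoopB (fuel : Nat) (x p t : Int) : Int :=
  match fuel with
  | 0 => x
  | Nat.succ fuel =>
    if t ≠ 0 then
      let d := PySem.Int.mod t 9
      convLoopB fuel (x + (if 3 ≤ d then d + 1 else d) * p) (p * 10) (PySem.Int.floordiv t 9)
    else x

-- B's outer while; fuel as in PORT A.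
def solutionLoopB (n : Int) (fuel : Nat) (cnt k ans : Int) : Int :=
  match fuel with
  | 0 => ans
  | Nat.succ fuel =>
    if cnt ≠ n then
      let k' := k + 1
      let x := convLoopB (k'.toNat + 1) 0 1 k'
      if PySem.Int.mod x 3 ≠ 0 then
        solutionLoopB n fuel (cnt + 1) k' x
      else
        solutionLoopB n fuel cnt k' ans
    else ans

def solution_alt (n : Int) : Int := solutionLoopB n (10 ^ n.toNat + 1) 0 0 0

-- ===== PRECONDITION & SPEC =====
-- Pre_ excludes n < 0, on which the Python A (and B) never terminates.
def Pre_solution (n : Int) : Prop := 0 ≤ n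
instance (n : Int) : Decidable (Pre_solution n) := by unfold Pre_solution; infer_instance
def pvWitness_solution : Int := (5)

def Spec_solution (n : Int) (out : Int) : Prop := out = solution_alt n
instance (n : Int) (out : Int) : Decidable (Spec_solution n out) := by unfold Spec_solution; infer_instance

-- ===== CLAIM (what is proved, stated in full; the proofs are below) =====
def Claim_equal_solution : Prop := ∀ (n : Int), Dom_solution n → Pre_solution n → Spec_solution n (solution n)

-- ===== LEMMAS AND PROOFS =====

-- arithmetic "contains digit 3"
def has3 (n : Nat) : Bool :=
  if h : n = 0 then false else (decide (n % 10 = 3) || has3 (n / 10))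
termination_by n
decreasing_by exact Nat.div_lt_self (Nat.pos_of_ne_zero h) (by omega)

def validN (x : Nat) : Bool := decide (x % 3 ≠ 0) && !has3 x

-- base-9 digit-mapping function computed by B's inner loop
def gN (k : Nat) : Nat :=
  if h : k = 0 then 0 else gN (k / 9) * 10 + (if k % 9 < 3 then k % 9 else k % 9 + 1)
termination_by k
decreasing_by exact Nat.div_lt_self (Nat.pos_of_ne_zero h) (by omega)

theorem has3_pow10 (e : Nat) : has3 (10 ^ e) = false := by
  induction e with
  | zero => rw [pow_zero, has3]; norm_num; rw [has3]; norm_num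
  | succ e ih =>
    have h10 : 10 ^ (e + 1) = 10 ^ e * 10 := by ring
    have hpos : 10 ^ e * 10 ≠ 0 := by positivity
    rw [h10, has3]
    simp [hpos, Nat.mul_mod_left, ih]


theorem pow10_mod3 (e : Nat) : 10 ^ e % 3 = 1 := by
  rw [Nat.pow_mod]; norm_num


theorem validN_pow10 (e : Nat) : validN (10 ^ e) = true := by
  have h := pow10_mod3 e
  simp [validN, has3_pow10, h]


theorem exists_valid_gt (a : Nat) : ∃ b, a < b ∧ validN b = true := by
  refine ⟨10 ^ (a + 1), ?_, validN_pow10 _⟩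
  calc a < 10 ^ a := Nat.lt_pow_self (by norm_num)
    _ ≤ 10 ^ (a + 1) := Nat.pow_le_pow_right (by norm_num) (by omega)


def nextV (a : Nat) : Nat := Nat.find (exists_valid_gt a)

def nthV : Nat → Nat
  | 0 => 0
  | c + 1 => nextV (nthV c)

theorem nthV_lt_succ (c : Nat) : nthV c < nthV (c + 1) := by
  exact (Nat.find_spec (exists_valid_gt (nthV c))).1


theorem nthV_mono {c d : Nat} (h : c ≤ d) : nthV c ≤ nthV d := by
  induction d with
  | zero => simp_all
  | succ d ih =>
    rcases Nat.lt_or_ge c (d + 1) with h' | h'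
    · exact le_trans (ih (by omega)) (le_of_lt (nthV_lt_succ d))
    · have : c = d + 1 := by omega
      subst this; rfl


theorem nthV_le_pow (n : Nat) : nthV n ≤ 10 ^ n := by
  induction n with
  | zero => simp [nthV]
  | succ n ih =>
    have hlt : nthV n < 10 ^ (n + 1) :=
      lt_of_le_of_lt ih (Nat.pow_lt_pow_right (by norm_num) (by omega))
    exact Nat.find_min' (exists_valid_gt (nthV n)) ⟨hlt, validN_pow10 _⟩


-- '3' in the decimal digit characters ↔ has3
theorem digitChar_eq_three {r : Nat} (h : r < 10) : Nat.digitChar r = '3' ↔ r = 3 := by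
  interval_cases r <;> simp [Nat.digitChar]


theorem mem3_toDigitsCore : ∀ fuel (n : Nat) (ds : List Char), n < fuel →
    ('3' ∈ Nat.toDigitsCore 10 fuel n ds ↔ (has3 n = true ∨ '3' ∈ ds)) := by
  intro fuel
  induction fuel with
  | zero => intro n ds h; omega
  | succ f ih =>
    intro n ds h
    rw [Nat.toDigitsCore.eq_def]
    have hd' : ('3' = (n % 10).digitChar) ↔ n % 10 = 3 :=
      eq_comm.trans (digitChar_eq_three (Nat.mod_lt _ (by omega)))
    by_cases h0 : n / 10 = 0
    · simp only [h0, if_true]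
      have hh3 : has3 n = true ↔ n % 10 = 3 := by
        by_cases hn : n = 0
        · subst hn; rw [has3]; simp
        · rw [has3]; simp only [hn, dite_false, Bool.or_eq_true, decide_eq_true_eq]
          rw [h0, has3]
          simp
      simp only [List.mem_cons, hh3, hd']
    · simp only [if_neg h0]
      have hn : n ≠ 0 := by intro h'; subst h'; simp at h0
      have hlt : n / 10 < f := by
        have := Nat.div_lt_self (Nat.pos_of_ne_zero hn) (by omega : (1:Nat) < 10)
        omega
      rw [ih (n / 10) _ hlt]
      have hh : has3 n = (decide (n % 10 = 3) || has3 (n / 10)) := by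
        rw [has3]; simp [hn]
      rw [hh]
      simp only [List.mem_cons, Bool.or_eq_true, decide_eq_true_eq, hd']
      tauto

theorem countgo_single (c : Char) : ∀ fuel (s : List Char) (acc : Nat), s.length ≤ fuel →
    PySem.Chars.count.go [c] fuel s acc = acc + s.count c := by
  intro fuel
  induction fuel with
  | zero =>
    intro s acc h
    have hs : s = [] := by
      cases s with
      | nil => rfl
      | cons a t => simp at h
    subst hs
    rw [PySem.Chars.count.go]
    simp
  | succ f ih =>
    intro s acc h
    cases s with
    | nil => rw [PySem.Chars.count.go] <;> simp
    | cons a t =>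
      rw [PySem.Chars.count.go]
      by_cases hc : a = c
      · subst hc
        have hpre : List.isPrefixOf [a] (a :: t) = true := by
          simp [List.isPrefixOf]
        rw [if_pos hpre]
        simp only [List.drop_succ_cons, List.drop_zero, List.length_singleton]
        rw [ih t (acc + 1) (by simp at h; omega)]
        simp
        omega
      · have hpre : List.isPrefixOf [c] (a :: t) = false := by
          simp [List.isPrefixOf]
          intro h'
          exact absurd h'.symm hc
        rw [if_neg (by simp [hpre])]
        rw [ih t acc (by simp at h; omega)]
        simp [List.count_cons]
        intro h'
        exact absurd h' hc

theorem chars_count_single (s : List Char) (c : Char) :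
    PySem.Chars.count s [c] = s.count c := by
  rw [PySem.Chars.count]
  simp only [List.isEmpty_cons]
  exact countgo_single c s.length s 0 (le_refl _) |>.trans (by omega)


-- A's branch condition, arithmetically
theorem condA (x : Nat) :
    (PySem.Int.mod (x : Int) 3 = 0 ∨ PySem.Str.count (PySem.Int.toStr (x : Int)) "3" ≠ 0)
      ↔ validN x = false := by
  have hmod : PySem.Int.mod (x : Int) 3 = ((x % 3 : Nat) : Int) := by
    exact_mod_cast PySem.Int.mod_natCast x 3
  have hcount : PySem.Str.count (PySem.Int.toStr (x : Int)) "3" = (Nat.toDigits 10 x).count '3' := by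
    rw [PySem.Str.count_eq]
    have h1 : (PySem.Int.toStr (x : Int)).toList = PySem.Int.toChars (x : Int) :=
      PySem.Int.toList_toStr _
    rw [h1]
    have h2 : PySem.Int.toChars (x : Int) = Nat.toDigits 10 x := by
      rw [PySem.Int.toChars]
      simp [Int.toNat_natCast]
    rw [h2]
    have h3 : ("3" : String).toList = ['3'] := rfl
    rw [h3, chars_count_single]
  have hmem : (Nat.toDigits 10 x).count '3' ≠ 0 ↔ has3 x = true := by
    have hm : '3' ∈ Nat.toDigits 10 x ↔ has3 x = true := by
      have h := mem3_toDigitsCore (x + 1) x [] (by omega)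
      simp only [List.not_mem_nil, or_false] at h
      rw [Nat.toDigits]
      exact h
    constructor
    · intro h
      exact hm.mp (List.count_pos_iff.mp (Nat.pos_of_ne_zero h))
    · intro h
      have := List.count_pos_iff.mpr (hm.mpr h)
      omega
  rw [hmod, hcount]
  rw [hmem]
  unfold validN
  constructor
  · intro h
    rcases h with h | h
    · have : x % 3 = 0 := by exact_mod_cast h
      simp [this]
    · simp [h]
  · intro h
    simp only [Bool.and_eq_false_iff] at h
    rcases h with h | h
    · left
      have : x % 3 = 0 := by
        simpa using h
      exact_mod_cast congrArg (Nat.cast : Nat → Int) this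
    · right
      simp at h
      simp [h]


-- B's inner loop computes gN
theorem convLoopB_eq : ∀ fuel (u : Nat) (x p : Int), u < fuel →
    convLoopB fuel x p (u : Int) = x + (gN u : Int) * p := by
  intro fuel
  induction fuel with
  | zero => intro u x p h; omega
  | succ f ih =>
    intro u x p h
    rw [convLoopB]
    by_cases hu : u = 0
    · subst hu
      rw [gN]
      simp
    · have hne : ((u : Nat) : Int) ≠ 0 := by exact_mod_cast hu
      rw [if_pos hne]
      have hmod : PySem.Int.mod (u : Int) 9 = ((u % 9 : Nat) : Int) := by
        exact_mod_cast PySem.Int.mod_natCast u 9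
      have hdiv : PySem.Int.floordiv (u : Int) 9 = ((u / 9 : Nat) : Int) := by
        exact_mod_cast PySem.Int.floordiv_natCast u 9
      simp only [hmod, hdiv]
      have hlt : u / 9 < f := by
        have := Nat.div_lt_self (Nat.pos_of_ne_zero hu) (by omega : (1:Nat) < 9)
        omega
      rw [ih (u / 9) _ _ hlt]
      have hg : gN u = gN (u / 9) * 10 + (if u % 9 < 3 then u % 9 else u % 9 + 1) := by
        rw [gN]; simp [hu]
      rw [hg]
      have hif : (if (3 : Int) ≤ ((u % 9 : Nat) : Int) then ((u % 9 : Nat) : Int) + 1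
          else ((u % 9 : Nat) : Int)) = (((if u % 9 < 3 then u % 9 else u % 9 + 1) : Nat) : Int) := by
        split_ifs with h1 h2 <;> push_cast at * <;> omega
      rw [hif]
      push_cast
      ring


theorem gN_ge (k : Nat) : k ≤ gN k := by
  induction k using Nat.strong_induction_on with
  | _ k ih =>
    by_cases hk : k = 0
    · subst hk; rw [gN]; simp
    · have h9 : k / 9 < k := Nat.div_lt_self (Nat.pos_of_ne_zero hk) (by omega)
      have ihh := ih (k / 9) h9
      rw [gN]
      simp only [hk, dite_false]
      have hdm := Nat.div_add_mod k 9
      split_ifs <;> omega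


theorem gN_strictMono : ∀ b a : Nat, a < b → gN a < gN b := by
  intro b
  induction b using Nat.strong_induction_on with
  | _ b ih =>
    intro a hab
    have hb : b ≠ 0 := by omega
    have hgb : gN b = gN (b / 9) * 10 + (if b % 9 < 3 then b % 9 else b % 9 + 1) := by
      rw [gN]; simp [hb]
    by_cases ha : a = 0
    · subst ha
      have hg0 : gN 0 = 0 := by rw [gN]; simp
      have := gN_ge b
      omega
    · have hga : gN a = gN (a / 9) * 10 + (if a % 9 < 3 then a % 9 else a % 9 + 1) := by
        rw [gN]; simp [ha]
      rcases Nat.lt_or_ge (a / 9) (b / 9) with h | h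
      · have hbd : b / 9 < b := Nat.div_lt_self (by omega) (by omega)
        have ihg := ih (b / 9) hbd (a / 9) h
        rw [hga, hgb]
        have ma : (if a % 9 < 3 then a % 9 else a % 9 + 1) ≤ 9 := by
          have := Nat.mod_lt a (show 0 < 9 by omega)
          split_ifs <;> omega
        omega
      · have hdivle : a / 9 ≤ b / 9 := Nat.div_le_div_right (le_of_lt hab)
        have hdiv : a / 9 = b / 9 := by omega
        have ha9 := Nat.div_add_mod a 9
        have hb9 := Nat.div_add_mod b 9
        rw [hga, hgb, hdiv]
        split_ifs <;> omega


theorem gN_lt_iff {a b : Nat} : gN a < gN b ↔ a < b := by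
  constructor
  · intro h
    rcases Nat.lt_trichotomy a b with h' | h' | h'
    · exact h'
    · subst h'; omega
    · exact absurd (gN_strictMono a b h') (by omega)
  · exact gN_strictMono b a


theorem gN_no3 (k : Nat) : has3 (gN k) = false := by
  induction k using Nat.strong_induction_on with
  | _ k ih =>
    by_cases hk : k = 0
    · subst hk
      have hg0 : gN 0 = 0 := by rw [gN]; simp
      rw [hg0, has3]
      simp
    · have h9 : k / 9 < k := Nat.div_lt_self (Nat.pos_of_ne_zero hk) (by omega)
      have hg : gN k = gN (k / 9) * 10 + (if k % 9 < 3 then k % 9 else k % 9 + 1) := by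
        rw [gN]; simp [hk]
      have hmlt : (if k % 9 < 3 then k % 9 else k % 9 + 1) ≤ 9 := by
        have := Nat.mod_lt k (show 0 < 9 by omega)
        split_ifs <;> omega
      have hm3 : (if k % 9 < 3 then k % 9 else k % 9 + 1) ≠ 3 := by
        split_ifs <;> omega
      have hne : gN k ≠ 0 := by have := gN_ge k; omega
      rw [hg] at hne ⊢
      rw [has3]
      have h1 : (gN (k / 9) * 10 + (if k % 9 < 3 then k % 9 else k % 9 + 1)) % 10
          = (if k % 9 < 3 then k % 9 else k % 9 + 1) := by omega
      have h2 : (gN (k / 9) * 10 + (if k % 9 < 3 then k % 9 else k % 9 + 1)) / 10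
          = gN (k / 9) := by omega
      simp [h1, h2, hm3, ih (k / 9) h9]


theorem gN_surj : ∀ y : Nat, has3 y = false → ∃ k, gN k = y := by
  intro y
  induction y using Nat.strong_induction_on with
  | _ y ih =>
    intro h
    by_cases hy : y = 0
    · exact ⟨0, by subst hy; rw [gN]; simp⟩
    · rw [has3] at h
      simp only [hy, dite_false, Bool.or_eq_false_iff, decide_eq_false_iff_not] at h
      obtain ⟨h1, h2⟩ := h
      obtain ⟨k', hk'⟩ := ih (y / 10) (Nat.div_lt_self (by omega) (by omega)) h2
      have hrlt : y % 10 < 10 := Nat.mod_lt _ (by omega)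
      refine ⟨k' * 9 + (if y % 10 < 3 then y % 10 else y % 10 - 1), ?_⟩
      set d := if y % 10 < 3 then y % 10 else y % 10 - 1 with hd
      have hd9 : d < 9 := by rw [hd]; split_ifs <;> omega
      have hg0 : gN 0 = 0 := by rw [gN]; simp
      have hk0 : k' * 9 + d ≠ 0 := by
        intro h0
        have hk'0 : k' = 0 := by omega
        have hd0 : d = 0 := by omega
        have hr0 : y % 10 = 0 := by
          rw [hd] at hd0; split_ifs at hd0 <;> omega
        rw [hk'0, hg0] at hk'
        have := Nat.div_add_mod y 10
        omega
      have hdiv : (k' * 9 + d) / 9 = k' := by omega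
      have hmod : (k' * 9 + d) % 9 = d := by omega
      rw [gN]
      simp only [hk0, dite_false, hdiv, hmod]
      have hif : (if d < 3 then d else d + 1) = y % 10 := by
        rw [hd]
        by_cases hc : y % 10 < 3
        · simp [hc]
        · have hnd : ¬ (y % 10 - 1 < 3) := by omega
          simp only [hc, if_false, hnd]
          omega
      rw [hif, hk']
      have := Nat.div_add_mod y 10
      omega


theorem between_gN_invalid {k y : Nat} (h1 : gN k < y) (h2 : y < gN (k + 1)) :
    validN y = false := by
  cases hy : has3 y
  · obtain ⟨j, hj⟩ := gN_surj y hy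
    have h1' : k < j := gN_lt_iff.mp (by rw [hj]; exact h1)
    have h2' : j < k + 1 := gN_lt_iff.mp (by rw [hj]; exact h2)
    omega
  · simp [validN, hy]


-- main loop invariants
theorem loopA_eq (n' : Nat) : ∀ fuel (c y : Nat), c ≤ n' → (c = n' → y = nthV c) →
    nthV c ≤ y → (∀ z, nthV c < z → z ≤ y → validN z = false) →
    nthV n' + 1 ≤ fuel + y →
    solutionLoopA (n' : Int) fuel (c : Int) (y : Int) = (nthV n' : Int) := by
  intro fuel
  induction fuel with
  | zero =>
    intro c y hc hceq hle hinv hfuel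
    rcases Nat.lt_or_ge c n' with hlt | hge
    · exfalso
      have hnext : nthV c < nthV (c + 1) := nthV_lt_succ c
      have hval : validN (nthV (c + 1)) = true := (Nat.find_spec (exists_valid_gt (nthV c))).2
      have hnle : ¬ (nthV (c + 1) ≤ y) := by
        intro hle'
        have hfz := hinv (nthV (c + 1)) hnext hle'
        rw [hfz] at hval
        exact absurd hval (by simp)
      have hmono := nthV_mono (show c + 1 ≤ n' by omega)
      omega
    · have hcn : c = n' := by omega
      have hy := hceq hcn
      rw [solutionLoopA]
      subst hcn
      rw [hy]
  | succ f ih =>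
    intro c y hc hceq hle hinv hfuel
    rw [solutionLoopA]
    by_cases hcn : c = n'
    · subst hcn
      rw [if_neg (by simp)]
      rw [hceq rfl]
    · have hcn' : (c : Int) ≠ (n' : Int) := by exact_mod_cast hcn
      rw [if_pos hcn']
      have hy1 : ((y : Nat) : Int) + 1 = ((y + 1 : Nat) : Int) := by push_cast; ring
      simp only [hy1]
      by_cases hv : validN (y + 1) = true
      · rw [if_neg (by rw [condA (y + 1)]; simp [hv])]
        have hstep : y + 1 = nthV (c + 1) := by
          have hminle : nextV (nthV c) ≤ y + 1 := Nat.find_min' _ ⟨by omega, hv⟩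
          have hgt : ¬ (nextV (nthV c) ≤ y) := by
            intro hle'
            have hsp : nthV c < nextV (nthV c) ∧ validN (nextV (nthV c)) = true :=
              Nat.find_spec (exists_valid_gt (nthV c))
            have hfz := hinv (nextV (nthV c)) hsp.1 hle'
            rw [hfz] at hsp
            exact absurd hsp.2 (by simp)
          show y + 1 = nextV (nthV c)
          omega
        have hc1 : ((c : Nat) : Int) + 1 = ((c + 1 : Nat) : Int) := by push_cast; ring
        rw [hc1]
        exact ih (c + 1) (y + 1) (by omega) (fun _ => hstep) (le_of_eq hstep.symm)
          (by intro z h1 h2; rw [← hstep] at h1; exact absurd h2 (by omega)) (by omega)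
      · have hvf : validN (y + 1) = false := by
          cases h' : validN (y + 1)
          · rfl
          · exact absurd h' hv
        rw [if_pos ((condA (y + 1)).mpr hvf)]
        refine ih c (y + 1) hc (fun h => absurd h hcn) (by omega) ?_ (by omega)
        intro z h1 h2
        by_cases hz : z ≤ y
        · exact hinv z h1 hz
        · have : z = y + 1 := by omega
          rw [this]
          exact hvf


theorem loopB_eq (n' : Nat) : ∀ fuel (c k a : Nat), c ≤ n' → a = nthV c →
    nthV c ≤ gN k → (∀ z, nthV c < z → z ≤ gN k → validN z = false) →
    nthV n' + 1 ≤ fuel + gN k →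
    solutionLoopB (n' : Int) fuel (c : Int) (k : Int) (a : Int) = (nthV n' : Int) := by
  intro fuel
  induction fuel with
  | zero =>
    intro c k a hc ha hle hinv hfuel
    rcases Nat.lt_or_ge c n' with hlt | hge
    · exfalso
      have hnext : nthV c < nthV (c + 1) := nthV_lt_succ c
      have hval : validN (nthV (c + 1)) = true := (Nat.find_spec (exists_valid_gt (nthV c))).2
      have hnle : ¬ (nthV (c + 1) ≤ gN k) := by
        intro hle'
        have hfz := hinv (nthV (c + 1)) hnext hle'
        rw [hfz] at hval
        exact absurd hval (by simp)
      have hmono := nthV_mono (show c + 1 ≤ n' by omega)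
      omega
    · have hcn : c = n' := by omega
      rw [solutionLoopB]
      subst hcn
      rw [ha]
  | succ f ih =>
    intro c k a hc ha hle hinv hfuel
    rw [solutionLoopB]
    by_cases hcn : c = n'
    · subst hcn
      rw [if_neg (by simp)]
      rw [ha]
    · have hcn' : (c : Int) ≠ (n' : Int) := by exact_mod_cast hcn
      rw [if_pos hcn']
      have hk1 : ((k : Nat) : Int) + 1 = ((k + 1 : Nat) : Int) := by push_cast; ring
      simp only [hk1]
      have hx : convLoopB ((((k + 1 : Nat) : Int)).toNat + 1) 0 1 ((k + 1 : Nat) : Int)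
          = ((gN (k + 1) : Nat) : Int) := by
        rw [Int.toNat_natCast]
        rw [convLoopB_eq (k + 2) (k + 1) 0 1 (by omega)]
        ring
      simp only [hx]
      have hmod3 : PySem.Int.mod ((gN (k + 1) : Nat) : Int) 3 = ((gN (k + 1) % 3 : Nat) : Int) := by
        exact_mod_cast PySem.Int.mod_natCast (gN (k + 1)) 3
      have hgklt : gN k < gN (k + 1) := gN_lt_iff.mpr (by omega)
      by_cases h3 : gN (k + 1) % 3 = 0
      · rw [if_neg (by rw [hmod3, h3]; simp)]
        have hvf : validN (gN (k + 1)) = false := by simp [validN, h3]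
        refine ih c (k + 1) a hc ha (by omega) ?_ (by omega)
        intro z h1 h2
        by_cases hz : z ≤ gN k
        · exact hinv z h1 hz
        · by_cases hz2 : z < gN (k + 1)
          · exact between_gN_invalid (by omega) hz2
          · have : z = gN (k + 1) := by omega
            rw [this]
            exact hvf
      · rw [if_pos (by rw [hmod3]; exact_mod_cast h3)]
        have hvalid : validN (gN (k + 1)) = true := by
          simp [validN, gN_no3, h3]
        have hstep : gN (k + 1) = nthV (c + 1) := by
          have hminle : nextV (nthV c) ≤ gN (k + 1) := Nat.find_min' _ ⟨by omega, hvalid⟩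
          have hsp : nthV c < nextV (nthV c) ∧ validN (nextV (nthV c)) = true :=
              Nat.find_spec (exists_valid_gt (nthV c))
          have hgt : ¬ (nextV (nthV c) ≤ gN k) := by
            intro hle'
            have hfz := hinv (nextV (nthV c)) hsp.1 hle'
            rw [hfz] at hsp
            exact absurd hsp.2 (by simp)
          have hnb : ¬ (nextV (nthV c) < gN (k + 1)) := by
            intro hlt'
            have hfz := between_gN_invalid (show gN k < nextV (nthV c) by omega) hlt'
            rw [hfz] at hsp
            exact absurd hsp.2 (by simp)
          show gN (k + 1) = nextV (nthV c)
          omega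
        have hc1 : ((c : Nat) : Int) + 1 = ((c + 1 : Nat) : Int) := by push_cast; ring
        rw [hc1]
        exact ih (c + 1) (k + 1) (gN (k + 1)) (by omega) hstep (le_of_eq hstep.symm)
          (by intro z h1 h2; rw [← hstep] at h1; exact absurd h2 (by omega)) (by omega)


theorem solution_eq_nthV (n' : Nat) : solution (n' : Int) = (nthV n' : Int) := by
  unfold solution
  rw [Int.toNat_natCast]
  have h0 : ((0 : Nat) : Int) = (0 : Int) := by norm_num
  rw [← h0]
  refine loopA_eq n' (10 ^ n' + 1) 0 0 (by omega) (fun _ => rfl) (le_refl _) ?_ ?_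
  · intro z h1 h2
    exact absurd h2 (by simp [nthV] at h1; omega)
  · have := nthV_le_pow n'
    simp
    omega


theorem solution_alt_eq_nthV (n' : Nat) : solution_alt (n' : Int) = (nthV n' : Int) := by
  unfold solution_alt
  rw [Int.toNat_natCast]
  have h0 : ((0 : Nat) : Int) = (0 : Int) := by norm_num
  rw [← h0]
  refine loopB_eq n' (10 ^ n' + 1) 0 0 0 (by omega) rfl ?_ ?_ ?_
  · show nthV 0 ≤ gN 0
    rw [gN]
    simp [nthV]
  · intro z h1 h2
    have hg0 : gN 0 = 0 := by rw [gN]; simp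
    rw [hg0] at h2
    simp [nthV] at h1
    omega
  · have := nthV_le_pow n'
    have hg0 : gN 0 = 0 := by rw [gN]; simp
    rw [hg0]
    omega


-- ===== VERDICT (by name: the statement is the Claim_ definition above) =====
theorem solution_spec : Claim_equal_solution := by
  intro n _ hpre
  unfold Spec_solution
  obtain ⟨n', rfl⟩ := Int.eq_ofNat_of_zero_le hpre
  rw [solution_eq_nthV, solution_alt_eq_nthV]
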